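-- pv_equiv track=rewrite | github.com/saw24033/edw | rail_helpers.py | search_stations
-- ===== SOURCE A (Python) =====
-- from typing import Dict, List, Set, Tuple, Optional
--
-- def all_stations(graph: Dict) -> List[str]:
--     """
--     Get all station names in the network.
--
--     Args:
--         graph: Network graph from load_rail_network()
--
--     Returns:
--         Sorted list of station names
--     """
--     return sorted(graph.keys())
--
-- def search_stations(graph: Dict, query: str) -> List[str]:
--     """
--     Search for stations matching a query string (case-insensitive fuzzy search).
--
--     Args:
--         graph: Network graph from load_rail_network()
--         query: Search string
--
--     Returns:
--         List of matching station names
--     """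
--     query_lower = query.lower()
--     stations = all_stations(graph)
--
--     # Exact match
--     exact_matches = [s for s in stations if s.lower() == query_lower]
--     if exact_matches:
--         return exact_matches
--
--     # Contains match
--     contains_matches = [s for s in stations if query_lower in s.lower()]
--     if contains_matches:
--         return contains_matches
--
--     # Word-based match
--     query_words = query_lower.split()
--     word_matches = []
--     for station in stations:
--         station_lower = station.lower()
--         if all(word in station_lower for word in query_words):
--             word_matches.append(station)
--
--     return word_matches
-- ===== SOURCE B (Python) =====
-- def search_stations(graph, query):
--     """Argmin-collect: score each sorted station once (0 exact, 1 contains,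
--     2 word-match, skip otherwise) and keep a running best score together with
--     the list of stations attaining it."""
--     ql = query.lower()
--     words = ql.split()
--     best, acc = 3, []
--     for s in sorted(graph):
--         sl = s.lower()
--         if sl == ql:
--             r = 0
--         elif ql in sl:
--             r = 1
--         elif all(w in sl for w in words):
--             r = 2
--         else:
--             continue
--         if r < best:
--             best, acc = r, [s]
--         elif r == best:
--             acc.append(s)
--     return acc
-- ===== Notes on version B (the rewrite author's own statement) =====
-- stated objective: alternative
-- what changed: Replaces A's three staged filter passes with early returns by a single argmin-collect sweep: each sorted station is scored once (0 exact, 1 contains, 2 word-match) and a running best score with the list of stations attaining it is maintained, resetting on a strictly better score and appending on ties.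
import Mathlib
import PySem

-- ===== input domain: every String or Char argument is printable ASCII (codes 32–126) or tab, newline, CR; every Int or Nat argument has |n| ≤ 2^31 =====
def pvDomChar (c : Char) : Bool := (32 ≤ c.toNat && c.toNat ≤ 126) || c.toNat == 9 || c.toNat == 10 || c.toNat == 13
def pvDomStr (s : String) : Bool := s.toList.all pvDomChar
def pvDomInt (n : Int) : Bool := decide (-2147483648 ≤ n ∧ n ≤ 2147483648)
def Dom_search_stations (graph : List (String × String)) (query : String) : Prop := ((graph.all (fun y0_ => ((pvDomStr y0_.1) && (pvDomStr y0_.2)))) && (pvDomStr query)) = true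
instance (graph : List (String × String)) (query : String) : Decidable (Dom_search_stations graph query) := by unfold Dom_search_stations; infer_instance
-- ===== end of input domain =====

-- B replaces A's staged filter passes by a single argmin-collect sweep (score each
-- station once, keep the running best tier and its stations); return value proved equal.

-- ===== PORT A =====
def search_stations (graph : List (String × String)) (query : String) : List String :=
  let query_lower := PySem.Str.lower query
  let stations := PySem.List.sorted (PySem.List.dedup (graph.map Prod.fst)) (fun x => x) false
  let exact_matches := stations.filter (fun s => PySem.Str.lower s == query_lower)
  if exact_matches ≠ [] then exact_matches
  else
    let contains_matches := stations.filter (fun s => PySem.Str.isIn query_lower (PySem.Str.lower s))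
    if contains_matches ≠ [] then contains_matches
    else
      let query_words := PySem.Str.split₀ query_lower
      stations.foldl (fun word_matches station =>
        let station_lower := PySem.Str.lower station
        if query_words.all (fun word => PySem.Str.isIn word station_lower) then
          word_matches ++ [station]
        else word_matches) []

-- ===== PORT B =====
-- running-best update: reset on a strictly better score, append on a tie
def ssUpd (st : Nat × List String) (r : Nat) (s : String) : Nat × List String :=
  if r < st.1 then (r, [s]) else if r = st.1 then (st.1, st.2 ++ [s]) else st

def search_stations_alt (graph : List (String × String)) (query : String) : List String :=
  let ql := PySem.Str.lower query
  let words := PySem.Str.split₀ ql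
  ((PySem.List.sorted (PySem.List.dedup (graph.map Prod.fst)) (fun x => x) false).foldl
    (fun (st : Nat × List String) s =>
      let sl := PySem.Str.lower s
      if sl == ql then ssUpd st 0 s
      else if PySem.Str.isIn ql sl then ssUpd st 1 s
      else if words.all (fun w => PySem.Str.isIn w sl) then ssUpd st 2 s
      else st)
    (3, [])).2

-- ===== PRECONDITION & SPEC =====
def Spec_search_stations (graph : List (String × String)) (query : String) (out : List String) : Prop := out = search_stations_alt graph query
instance (graph : List (String × String)) (query : String) (out : List String) : Decidable (Spec_search_stations graph query out) := by unfold Spec_search_stations; infer_instance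

-- ===== CLAIM =====
def Claim_equal_search_stations : Prop := ∀ (graph : List (String × String)) (query : String), Dom_search_stations graph query → Spec_search_stations graph query (search_stations graph query)

-- ===== LEMMAS AND PROOFS =====
-- Closed form of the argmin-collect fold: with current best b and collected acc,
-- the fold over l ends in the state described by the exclusive tier filters.
def ssSel (p0 p1 p2 : String → Bool) (b : Nat) (acc : List String) (l : List String) : Nat × List String :=
  if b = 0 then (0, acc ++ l.filter p0)
  else if l.filter p0 ≠ [] then (0, l.filter p0)
  else if b = 1 then (1, acc ++ l.filter (fun s => !p0 s && p1 s))
  else if l.filter (fun s => !p0 s && p1 s) ≠ [] then (1, l.filter (fun s => !p0 s && p1 s))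
  else if b = 2 then (2, acc ++ l.filter (fun s => !p0 s && !p1 s && p2 s))
  else if l.filter (fun s => !p0 s && !p1 s && p2 s) ≠ [] then (2, l.filter (fun s => !p0 s && !p1 s && p2 s))
  else (b, acc)

theorem ssSel_cons_none (p0 p1 p2 : String → Bool) (x : String) (xs : List String) (b : Nat) (acc : List String)
    (h0 : p0 x = false) (h1 : p1 x = false) (h2 : p2 x = false) :
    ssSel p0 p1 p2 b acc (x :: xs) = ssSel p0 p1 p2 b acc xs := by
  unfold ssSel; simp [h0, h1, h2]

theorem ssSel_cons0_zero (p0 p1 p2 : String → Bool) (x : String) (xs : List String) (acc : List String)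
    (h0 : p0 x = true) :
    ssSel p0 p1 p2 0 acc (x :: xs) = ssSel p0 p1 p2 0 (acc ++ [x]) xs := by
  unfold ssSel; simp [h0]

theorem ssSel_cons0_pos (p0 p1 p2 : String → Bool) (x : String) (xs : List String) (b : Nat) (acc : List String)
    (h0 : p0 x = true) (hb : b ≠ 0) :
    ssSel p0 p1 p2 b acc (x :: xs) = ssSel p0 p1 p2 0 [x] xs := by
  unfold ssSel; simp [h0, hb]

theorem ssSel_cons1_zero (p0 p1 p2 : String → Bool) (x : String) (xs : List String) (acc : List String)
    (h0 : p0 x = false) :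
    ssSel p0 p1 p2 0 acc (x :: xs) = ssSel p0 p1 p2 0 acc xs := by
  unfold ssSel; simp [h0]

theorem ssSel_cons1_one (p0 p1 p2 : String → Bool) (x : String) (xs : List String) (acc : List String)
    (h0 : p0 x = false) (h1 : p1 x = true) :
    ssSel p0 p1 p2 1 acc (x :: xs) = ssSel p0 p1 p2 1 (acc ++ [x]) xs := by
  unfold ssSel
  simp only [List.filter_cons, h0, h1, Bool.not_false, Bool.and_true, if_true]
  split_ifs <;> simp_all

theorem ssSel_cons1_big (p0 p1 p2 : String → Bool) (x : String) (xs : List String) (b : Nat) (acc : List String)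
    (h0 : p0 x = false) (h1 : p1 x = true) (hb : 1 < b) :
    ssSel p0 p1 p2 b acc (x :: xs) = ssSel p0 p1 p2 1 [x] xs := by
  unfold ssSel
  simp only [List.filter_cons, h0, h1, Bool.not_false, Bool.and_true, if_true]
  split_ifs <;> simp_all

theorem ssSel_cons2_small (p0 p1 p2 : String → Bool) (x : String) (xs : List String) (b : Nat) (acc : List String)
    (h0 : p0 x = false) (h1 : p1 x = false) (hb : b < 2) :
    ssSel p0 p1 p2 b acc (x :: xs) = ssSel p0 p1 p2 b acc xs := by
  unfold ssSel
  simp only [List.filter_cons, h0, h1, Bool.not_false, Bool.true_and, Bool.and_false]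
  split_ifs <;> simp_all <;> omega

theorem ssSel_cons2_two (p0 p1 p2 : String → Bool) (x : String) (xs : List String) (acc : List String)
    (h0 : p0 x = false) (h1 : p1 x = false) (h2 : p2 x = true) :
    ssSel p0 p1 p2 2 acc (x :: xs) = ssSel p0 p1 p2 2 (acc ++ [x]) xs := by
  unfold ssSel
  simp only [List.filter_cons, h0, h1, h2, Bool.not_false, Bool.true_and, Bool.and_true]
  split_ifs <;> simp_all

theorem ssSel_cons2_big (p0 p1 p2 : String → Bool) (x : String) (xs : List String) (b : Nat) (acc : List String)
    (h0 : p0 x = false) (h1 : p1 x = false) (h2 : p2 x = true) (hb : 2 < b) :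
    ssSel p0 p1 p2 b acc (x :: xs) = ssSel p0 p1 p2 2 [x] xs := by
  unfold ssSel
  simp only [List.filter_cons, h0, h1, h2, Bool.not_false, Bool.true_and, Bool.and_true]
  split_ifs <;> simp_all

theorem ssFold_eq_ssSel (p0 p1 p2 : String → Bool) (l : List String) (b : Nat) (acc : List String) :
    l.foldl (fun (st : Nat × List String) s =>
      if p0 s then ssUpd st 0 s
      else if p1 s then ssUpd st 1 s
      else if p2 s then ssUpd st 2 s
      else st) (b, acc)
    = ssSel p0 p1 p2 b acc l := by
  induction l generalizing b acc with
  | nil => unfold ssSel; split_ifs <;> simp_all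
  | cons x xs ih =>
    rw [List.foldl_cons]
    by_cases h0 : p0 x = true
    · rw [if_pos h0]
      rcases Nat.eq_zero_or_pos b with hb | hb
      · subst hb
        have : ssUpd (0, acc) 0 x = (0, acc ++ [x]) := by unfold ssUpd; simp
        rw [this, ih, ssSel_cons0_zero p0 p1 p2 x xs acc h0]
      · have : ssUpd (b, acc) 0 x = (0, [x]) := by unfold ssUpd; simp [hb]
        rw [this, ih, ssSel_cons0_pos p0 p1 p2 x xs b acc h0 (Nat.pos_iff_ne_zero.mp hb)]
    · have h0' : p0 x = false := by simpa using h0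
      rw [if_neg h0]
      by_cases h1 : p1 x = true
      · rw [if_pos h1]
        rcases lt_trichotomy b 1 with hb | hb | hb
        · have hb0 : b = 0 := by omega
          subst hb0
          have : ssUpd (0, acc) 1 x = (0, acc) := by unfold ssUpd; simp
          rw [this, ih, ssSel_cons1_zero p0 p1 p2 x xs acc h0']
        · subst hb
          have : ssUpd (1, acc) 1 x = (1, acc ++ [x]) := by unfold ssUpd; simp
          rw [this, ih, ssSel_cons1_one p0 p1 p2 x xs acc h0' h1]
        · have : ssUpd (b, acc) 1 x = (1, [x]) := by unfold ssUpd; simp [hb]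
          rw [this, ih, ssSel_cons1_big p0 p1 p2 x xs b acc h0' h1 hb]
      · have h1' : p1 x = false := by simpa using h1
        rw [if_neg h1]
        by_cases h2 : p2 x = true
        · rw [if_pos h2]
          rcases lt_trichotomy b 2 with hb | hb | hb
          · have : ssUpd (b, acc) 2 x = (b, acc) := by
              unfold ssUpd; have : ¬ 2 < b := by omega
              simp only [this, if_false]
              split_ifs with h <;> simp_all
            rw [this, ih, ssSel_cons2_small p0 p1 p2 x xs b acc h0' h1' hb]
          · subst hb
            have : ssUpd (2, acc) 2 x = (2, acc ++ [x]) := by unfold ssUpd; simp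
            rw [this, ih, ssSel_cons2_two p0 p1 p2 x xs acc h0' h1' h2]
          · have : ssUpd (b, acc) 2 x = (2, [x]) := by unfold ssUpd; simp [hb]
            rw [this, ih, ssSel_cons2_big p0 p1 p2 x xs b acc h0' h1' h2 hb]
        · rw [if_neg h2, ih, ssSel_cons_none p0 p1 p2 x xs b acc h0' h1' (by simpa using h2)]

-- A's word-matches fold is a filter.
theorem wordFold_eq_filter (q : List String) (l : List String) (acc : List String) :
    l.foldl (fun word_matches station =>
      if q.all (fun word => PySem.Str.isIn word (PySem.Str.lower station)) then
        word_matches ++ [station]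
      else word_matches) acc
    = acc ++ l.filter (fun station => q.all (fun word => PySem.Str.isIn word (PySem.Str.lower station))) := by
  induction l generalizing acc with
  | nil => simp
  | cons x xs ih =>
    rw [List.foldl_cons, List.filter_cons]
    by_cases h : (q.all fun word => PySem.Str.isIn word (PySem.Str.lower x)) = true
    · rw [if_pos h, if_pos h, ih, List.append_assoc, List.singleton_append]
    · rw [if_neg h, if_neg h, ih]

-- ===== VERDICT =====
theorem search_stations_spec : Claim_equal_search_stations := by
  intro graph query _
  unfold Spec_search_stations search_stations search_stations_alt
  simp only []
  rw [ssFold_eq_ssSel (fun s => PySem.Str.lower s == PySem.Str.lower query)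
      (fun s => PySem.Str.isIn (PySem.Str.lower query) (PySem.Str.lower s))
      (fun s => (PySem.Str.split₀ (PySem.Str.lower query)).all
        (fun w => PySem.Str.isIn w (PySem.Str.lower s)))]
  rw [wordFold_eq_filter]
  rw [List.nil_append]
  set st := PySem.List.sorted (PySem.List.dedup (graph.map Prod.fst)) (fun x => x) false with hst
  set ql := PySem.Str.lower query with hql
  unfold ssSel
  rw [if_neg (by norm_num : ¬ (3:Nat) = 0)]
  by_cases he : st.filter (fun s => PySem.Str.lower s == ql) = []
  · rw [if_neg (by simpa using he), if_neg (by norm_num : ¬ (3:Nat) = 1)]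
    have hpe : ∀ s ∈ st, (PySem.Str.lower s == ql) = false := by
      intro s hs
      have := List.filter_eq_nil_iff.mp he s hs
      simpa using this
    have hcg : st.filter (fun s => !(PySem.Str.lower s == ql) && PySem.Str.isIn ql (PySem.Str.lower s))
        = st.filter (fun s => PySem.Str.isIn ql (PySem.Str.lower s)) := by
      apply List.filter_congr
      intro s hs
      simp [hpe s hs]
    rw [hcg]
    by_cases hc : st.filter (fun s => PySem.Str.isIn ql (PySem.Str.lower s)) = []
    · rw [if_neg (by simpa using hc), if_neg (by norm_num : ¬ (3:Nat) = 2)]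
      have hpc : ∀ s ∈ st, PySem.Str.isIn ql (PySem.Str.lower s) = false := by
        intro s hs
        have := List.filter_eq_nil_iff.mp hc s hs
        simpa using this
      have hwg : st.filter (fun s => !(PySem.Str.lower s == ql) && !(PySem.Str.isIn ql (PySem.Str.lower s)) &&
            (PySem.Str.split₀ ql).all (fun w => PySem.Str.isIn w (PySem.Str.lower s)))
          = st.filter (fun s => (PySem.Str.split₀ ql).all (fun w => PySem.Str.isIn w (PySem.Str.lower s))) := by
        apply List.filter_congr
        intro s hs
        have h2 : PySem.Chars.isIn ql.toList (PySem.Chars.lower s.toList) = false := by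
          simpa using hpc s hs
        simp [hpe s hs, h2]
      rw [hwg]
      rw [if_neg (by simpa using he), if_neg (by simpa using hc)]
      by_cases hw : st.filter (fun s => (PySem.Str.split₀ ql).all (fun w => PySem.Str.isIn w (PySem.Str.lower s))) = []
      · rw [if_neg (by simpa using hw)]
        simpa using hw
      · rw [if_pos (by simpa using hw)]
    · rw [if_pos (by simpa using hc), if_neg (by simpa using he), if_pos (by simpa using hc)]
  · rw [if_pos (by simpa using he), if_pos (by simpa using he)]
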